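-- pv_equiv track=rewrite | github.com/machine1337/pyobfuscate | pyobfuscate.py | nullifysec
-- ===== SOURCE A (Python) =====
-- def nullifysec(wit):
--     wite = 0
--     while wite < 3:
--         witen = wit.copy()
--         for witeo in range(len(wit)):
--             witen[witeo] = wit[len(wit) - witeo - 1] - 3
--         wit = witen
--         wite += 1
--     return wit
-- ===== SOURCE B (Python) =====
-- def nullifysec(wit):
--     return [x - 9 for x in reversed(wit)]
-- ===== Notes on version B (the rewrite author's own statement) =====
-- stated objective: simpler
-- what changed: Three reverse-and-subtract-3 passes (each building a fresh indexed copy) collapse to a single comprehension over the reversed list subtracting 9, since three reversals equal one and the constants add.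
import Mathlib
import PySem

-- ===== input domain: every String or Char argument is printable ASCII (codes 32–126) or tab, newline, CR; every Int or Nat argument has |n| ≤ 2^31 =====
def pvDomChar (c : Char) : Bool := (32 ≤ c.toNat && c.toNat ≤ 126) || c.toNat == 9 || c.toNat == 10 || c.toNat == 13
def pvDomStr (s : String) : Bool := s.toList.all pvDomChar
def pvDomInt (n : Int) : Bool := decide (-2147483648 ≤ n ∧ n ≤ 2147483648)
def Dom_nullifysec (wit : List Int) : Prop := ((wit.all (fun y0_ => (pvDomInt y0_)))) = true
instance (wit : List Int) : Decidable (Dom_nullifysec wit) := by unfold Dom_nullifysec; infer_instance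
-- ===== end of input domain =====

-- B replaces A's three reverse-and-subtract-3 passes (each an indexed copy) by one
-- comprehension over the reversed list subtracting 9; return value only, neither mutates.

-- ===== PORT A =====
-- one iteration of A's while-body: witen = wit.copy(); for witeo in range(len(wit)): witen[witeo] = wit[len(wit)-witeo-1] - 3
def nullifysecBody (wit : List Int) : List Int :=
  (PySem.List.pyRange 0 wit.length 1).foldl
    (fun witen witeo =>
      PySem.List.pySetD witen witeo
        (PySem.List.pyGetD wit ((wit.length : Int) - witeo - 1) 0 - 3))
    wit

-- the 'while wite < 3' loop, counting the remaining iterations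
def nullifysecLoop : Nat → List Int → List Int
  | 0, wit => wit
  | n + 1, wit => nullifysecLoop n (nullifysecBody wit)

def nullifysec (wit : List Int) : List Int := nullifysecLoop 3 wit

-- ===== PORT B =====
def nullifysec_alt (wit : List Int) : List Int := wit.reverse.map (fun x => x - 9)

-- ===== PRECONDITION & SPEC =====
def Spec_nullifysec (wit : List Int) (out : List Int) : Prop := out = nullifysec_alt wit
instance (wit : List Int) (out : List Int) : Decidable (Spec_nullifysec wit out) := by unfold Spec_nullifysec; infer_instance

-- ===== CLAIM (what is proved, stated in full; the proofs are below) =====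
def Claim_equal_nullifysec : Prop := ∀ (wit : List Int), Dom_nullifysec wit → Spec_nullifysec wit (nullifysec wit)

-- ===== LEMMAS AND PROOFS =====

theorem nullifysec_foldl_getElem? (wit : List Int) :
    ∀ (n : Nat) (acc : List Int), n ≤ wit.length → acc.length = wit.length →
    ∀ (j : Nat),
      ((PySem.List.pyRange 0 n 1).foldl
        (fun witen witeo =>
          PySem.List.pySetD witen witeo
            (PySem.List.pyGetD wit ((wit.length : Int) - witeo - 1) 0 - 3)) acc)[j]? =
      if j < n then (wit.reverse.map (fun x => x - 3))[j]? else acc[j]? := by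
  intro n
  induction n with
  | zero =>
    intro acc _ _ j
    simp
  | succ n ih =>
    intro acc hn hl j
    have hrange : PySem.List.pyRange 0 ((n : Int) + 1) 1
        = PySem.List.pyRange 0 (n : Int) 1 ++ [(n : Int)] := by
      exact PySem.List.pyRange_one_succ_right (by exact_mod_cast Nat.zero_le n)
    have hcast : ((n + 1 : Nat) : Int) = (n : Int) + 1 := by push_cast; ring
    rw [show ((n + 1 : Nat) : Int) = (n : Int) + 1 from hcast] at *
    rw [hrange, List.foldl_append]
    set res := (PySem.List.pyRange 0 (n : Int) 1).foldl
        (fun witen witeo =>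
          PySem.List.pySetD witen witeo
            (PySem.List.pyGetD wit ((wit.length : Int) - witeo - 1) 0 - 3)) acc with hres
    have hreslen : res.length = wit.length := by
      have : ∀ (l : List Int) (a : List Int), a.length = wit.length →
          (l.foldl (fun witen witeo =>
            PySem.List.pySetD witen witeo
              (PySem.List.pyGetD wit ((wit.length : Int) - witeo - 1) 0 - 3)) a).length
          = wit.length := by
        intro l
        induction l with
        | nil => intro a ha; simpa using ha
        | cons x xs ihl =>
          intro a ha
          simp only [List.foldl_cons]
          exact ihl _ (by simp [PySem.List.length_pySetD, ha])
      exact this _ _ hl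
    have hres? : ∀ (j : Nat), res[j]? =
        if j < n then (wit.reverse.map (fun x => x - 3))[j]? else acc[j]? :=
      ih acc (by omega) hl
    simp only [List.foldl_cons, List.foldl_nil]
    -- the last write sets index n
    have hsetn : PySem.List.pySetD res ((n : Nat) : Int)
        (PySem.List.pyGetD wit ((wit.length : Int) - (n : Int) - 1) 0 - 3)
        = res.set n (PySem.List.pyGetD wit ((wit.length : Int) - (n : Int) - 1) 0 - 3) :=
      by simp [PySem.List.pySetD_natCast]
    rw [hsetn, List.getElem?_set]
    have hnlt : n < wit.length := by omega
    by_cases hj : j = n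
    · subst hj
      have hlt : j < res.length := by omega
      simp only [if_pos hlt]
      have hidx : (wit.length : Int) - (j : Int) - 1 = ((wit.length - j - 1 : Nat) : Int) := by
        omega
      have hv : PySem.List.pyGetD wit ((wit.length : Int) - (j : Int) - 1) 0
          = wit[wit.length - j - 1]'(by omega) := by
        rw [hidx, PySem.List.pyGetD_natCast]
        simp [List.getD_eq_getElem?_getD, List.getElem?_eq_getElem (show wit.length - j - 1 < wit.length by omega)]
      rw [hv]
      have hjrev : j < wit.reverse.length := by simpa using hnlt
      simp only [if_pos (show j < j + 1 by omega), List.getElem?_map,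
        List.getElem?_eq_getElem hjrev, Option.map_some, List.getElem_reverse,
        show wit.length - 1 - j = wit.length - j - 1 from by omega]
      simp
    · rw [if_neg (fun h => hj h.symm), hres? j]
      by_cases hjn : j < n
      · rw [if_pos hjn, if_pos (by omega)]
      · rw [if_neg hjn, if_neg (by omega)]

theorem nullifysecBody_eq (wit : List Int) :
    nullifysecBody wit = wit.reverse.map (fun x => x - 3) := by
  apply List.ext_getElem?
  intro j
  unfold nullifysecBody
  rw [show ((wit.length : Nat) : Int) = ((wit.length : Nat) : Int) from rfl]
  have h := nullifysec_foldl_getElem? wit wit.length wit le_rfl rfl j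
  rw [h]
  by_cases hj : j < wit.length
  · rw [if_pos hj]
  · rw [if_neg hj]
    rw [List.getElem?_eq_none (by omega), List.getElem?_eq_none (by simp; omega)]

-- ===== VERDICT (by name: the statement is the Claim_ definition above) =====
theorem nullifysec_spec : Claim_equal_nullifysec := by
  intro wit _
  unfold Spec_nullifysec nullifysec nullifysec_alt
  simp only [nullifysecLoop]
  rw [nullifysecBody_eq, nullifysecBody_eq, nullifysecBody_eq]
  simp only [List.map_reverse, List.reverse_reverse, List.map_map]
  congr 1
  exact List.map_congr_left (fun x _ => by simp only [Function.comp_apply]; ring)
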